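-- pv_equiv track=rewrite | github.com/Cycrypto/BOJ | 프로그래머스/1/42862. 체육복/체육복.py | solution
-- ===== SOURCE A (Python) =====
-- def solution(n, lost, reserve):
--     lost = set(lost)
--     reserve = set(reserve)
--
--     overlap = lost & reserve
--     lost -= overlap
--     reserve -= overlap
--
--     for x in sorted(lost):
--         if x - 1 in reserve:
--             reserve.remove(x - 1)
--         elif x + 1 in reserve:
--             reserve.remove(x + 1)
--         else:
--             n -= 1
--
--     return n
-- ===== SOURCE B (Python) =====
-- def solution(n, lost, reserve):
--     # Two-pointer merge over the two sorted difference lists instead of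
--     # membership tests + removal on a mutating set.
--     need = sorted(set(lost) - set(reserve))
--     have = sorted(set(reserve) - set(lost))
--     j = 0
--     for x in need:
--         while j < len(have) and have[j] < x - 1:
--             j += 1
--         if j < len(have) and have[j] <= x + 1:
--             j += 1
--         else:
--             n -= 1
--     return n
-- ===== Notes on version B (the rewrite author's own statement) =====
-- stated objective: alternative
-- what changed: Replaced the set-membership/removal greedy loop with a two-pointer merge: both difference sets are sorted once and the reserve list is consumed from the front in a single monotone sweep, with no set mutation or membership tests in the loop.
import Mathlib
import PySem

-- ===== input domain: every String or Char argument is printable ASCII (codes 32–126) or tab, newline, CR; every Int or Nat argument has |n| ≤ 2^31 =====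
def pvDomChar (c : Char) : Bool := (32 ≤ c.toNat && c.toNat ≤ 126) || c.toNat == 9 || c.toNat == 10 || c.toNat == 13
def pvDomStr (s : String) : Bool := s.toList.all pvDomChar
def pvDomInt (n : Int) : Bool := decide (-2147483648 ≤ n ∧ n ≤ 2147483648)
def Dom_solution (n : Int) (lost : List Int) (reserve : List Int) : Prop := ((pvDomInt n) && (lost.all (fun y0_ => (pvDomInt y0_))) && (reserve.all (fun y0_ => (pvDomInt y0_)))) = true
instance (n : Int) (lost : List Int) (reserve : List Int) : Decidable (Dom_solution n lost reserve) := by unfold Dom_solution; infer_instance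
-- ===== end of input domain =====

-- B replaces A's set-membership/removal greedy loop by a two-pointer merge over the
-- two sorted difference lists (alternative decomposition, same asymptotic cost).

-- ===== PORT A =====
-- the 'for x in sorted(lost): …' loop; reserve.remove(e) after a successful membership
-- test is PySem.Set.discard (exact, since e is known to be in the set)
def solLoopA : List Int → Int → PySem.Set Int → Int
  | [], n, _ => n
  | x :: xs, n, r =>
    if PySem.Set.contains r (x - 1) then solLoopA xs n (PySem.Set.discard r (x - 1))
    else if PySem.Set.contains r (x + 1) then solLoopA xs n (PySem.Set.discard r (x + 1))
    else solLoopA xs (n - 1) r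

def solution (n : Int) (lost : List Int) (reserve : List Int) : Int :=
  let lostS := PySem.Set.ofList lost
  let reserveS := PySem.Set.ofList reserve
  let overlap := PySem.Set.inter lostS reserveS
  let lostS' := PySem.Set.diff lostS overlap
  let reserveS' := PySem.Set.diff reserveS overlap
  solLoopA (PySem.List.sorted lostS' (fun x => x)) n reserveS'

-- ===== PORT B =====
-- 'while j < len(have) and have[j] < x - 1: j += 1'
def advance (hv : List Int) (x : Int) (j : Nat) : Nat :=
  if h : j < hv.length then
    if hv[j] < x - 1 then advance hv x (j + 1) else j
  else j
termination_by hv.length - j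

-- the 'for x in need:' loop carrying n and the pointer j into have
def solLoopB : List Int → Int → List Int → Nat → Int
  | [], n, _, _ => n
  | x :: xs, n, hv, j =>
    let j' := advance hv x j
    if h : j' < hv.length then
      if hv[j'] ≤ x + 1 then solLoopB xs n hv (j' + 1)
      else solLoopB xs (n - 1) hv j'
    else solLoopB xs (n - 1) hv j'

def solution_alt (n : Int) (lost : List Int) (reserve : List Int) : Int :=
  let need := PySem.List.sorted (PySem.Set.diff (PySem.Set.ofList lost) (PySem.Set.ofList reserve)) (fun x => x)
  let haveL := PySem.List.sorted (PySem.Set.diff (PySem.Set.ofList reserve) (PySem.Set.ofList lost)) (fun x => x)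
  solLoopB need n haveL 0

-- ===== PRECONDITION & SPEC =====
def Spec_solution (n : Int) (lost : List Int) (reserve : List Int) (out : Int) : Prop := out = solution_alt n lost reserve
instance (n : Int) (lost : List Int) (reserve : List Int) (out : Int) : Decidable (Spec_solution n lost reserve out) := by unfold Spec_solution; infer_instance

-- ===== CLAIM (what is proved, stated in full; the proofs are below) =====
def Claim_equal_solution : Prop := ∀ (n : Int) (lost : List Int) (reserve : List Int), Dom_solution n lost reserve → Spec_solution n lost reserve (solution n lost reserve)

-- ===== LEMMAS AND PROOFS =====

-- proof-side helper: the B loop re-expressed as consuming the suffix hv.drop j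
def dropSmall (x : Int) : List Int → List Int
  | [] => []
  | h :: t => if h < x - 1 then dropSmall x t else h :: t

def bConsume : List Int → Int → List Int → Int
  | [], n, _ => n
  | x :: xs, n, hv =>
    match dropSmall x hv with
    | [] => bConsume xs (n - 1) []
    | h :: t => if h ≤ x + 1 then bConsume xs n t else bConsume xs (n - 1) (h :: t)

lemma advance_drop (hv : List Int) (x : Int) (j : Nat) :
    hv.drop (advance hv x j) = dropSmall x (hv.drop j) := by
  rw [advance]
  by_cases h : j < hv.length
  · rw [dif_pos h, List.drop_eq_getElem_cons h]
    by_cases hc : hv[j] < x - 1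
    · rw [if_pos hc, advance_drop hv x (j + 1)]
      simp [dropSmall, hc]
    · rw [if_neg hc]
      simp [dropSmall, hc, ← List.drop_eq_getElem_cons h]
  · rw [dif_neg h]
    have hnil : hv.drop j = [] := List.drop_eq_nil_iff.2 (by omega)
    simp [hnil, dropSmall]
termination_by hv.length - j

lemma loopB_eq_consume : ∀ (need : List Int) (n : Int) (hv : List Int) (j : Nat),
    solLoopB need n hv j = bConsume need n (hv.drop j) := by
  intro need
  induction need with
  | nil => intro n hv j; rfl
  | cons x xs ih =>
    intro n hv j
    simp only [solLoopB, bConsume]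
    have hd : dropSmall x (hv.drop j) = hv.drop (advance hv x j) := (advance_drop hv x j).symm
    rw [hd]
    by_cases h : advance hv x j < hv.length
    · rw [dif_pos h, List.drop_eq_getElem_cons h]
      by_cases hle : hv[advance hv x j] ≤ x + 1
      · rw [if_pos hle, ih]
        simp [hle]
      · rw [if_neg hle, ih, List.drop_eq_getElem_cons h]
        simp [hle]
    · rw [dif_neg h]
      have hnil : hv.drop (advance hv x j) = [] := List.drop_eq_nil_iff.2 (by omega)
      rw [hnil, ih]
      have hnil2 : hv.drop (advance hv x j) = [] := hnil
      rw [hnil2]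

lemma dropSmall_eq_dropWhile (x : Int) (hv : List Int) :
    dropSmall x hv = hv.dropWhile (fun h => decide (h < x - 1)) := by
  induction hv with
  | nil => rfl
  | cons h t ih =>
    simp only [dropSmall, List.dropWhile]
    by_cases hc : h < x - 1 <;> simp [hc, ih]

lemma dropSmall_head (x : Int) : ∀ (hv : List Int) (h : Int) (t : List Int),
    dropSmall x hv = h :: t → ¬ h < x - 1 := by
  intro hv
  induction hv with
  | nil => intro h t he; simp [dropSmall] at he
  | cons a s ih =>
    intro h t he
    by_cases hc : a < x - 1
    · simp only [dropSmall, if_pos hc] at he; exact ih h t he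
    · simp only [dropSmall, if_neg hc] at he; cases he; omega

lemma pairwise_lt_of_le_nodup (l : List Int) (h1 : l.Pairwise (· ≤ ·)) (h2 : l.Nodup) :
    l.Pairwise (· < ·) :=
  (List.Pairwise.and h1 h2).imp (fun {_ _} h => lt_of_le_of_ne h.1 h.2)

-- main loop invariant: A\'s remaining set R is (as a set) the already-skipped small
-- elements S plus B\'s remaining sorted suffix hv
lemma loop_eq : ∀ (need : List Int) (n : Int) (S hv R : List Int),
    need.Pairwise (· < ·) → hv.Pairwise (· < ·) →
    (∀ s ∈ S, ∀ x ∈ need, s < x - 1) →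
    (∀ h ∈ hv, h ∉ need) →
    R.Perm (S ++ hv) →
    solLoopA need n R = bConsume need n hv := by
  intro need
  induction need with
  | nil => intro n S hv R _ _ _ _ _; rfl
  | cons x xs ih =>
    intro n S hv R hneed hhv hS hdisj hperm
    have hxlt : ∀ x' ∈ xs, x < x' := (List.pairwise_cons.1 hneed).1
    have hsplit : hv = hv.takeWhile (fun h => decide (h < x - 1)) ++ dropSmall x hv := by
      rw [dropSmall_eq_dropWhile]
      exact (List.takeWhile_append_dropWhile).symm
    set D := hv.takeWhile (fun h => decide (h < x - 1)) with hD
    have hDlt : ∀ d ∈ D, d < x - 1 := by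
      intro d hd
      have := List.mem_takeWhile_imp hd
      simpa using this
    have hS' : ∀ s ∈ S ++ D, ∀ x' ∈ xs, s < x' - 1 := by
      intro s hs x' hx'
      have hxx := hxlt x' hx'
      rcases List.mem_append.1 hs with h1 | h2
      · have := hS s h1 x (List.mem_cons_self) ; omega
      · have := hDlt s h2; omega
    have hpw : (D ++ dropSmall x hv).Pairwise (· < ·) := hsplit ▸ hhv
    have hpwDrop : (dropSmall x hv).Pairwise (· < ·) := (List.pairwise_append.1 hpw).2.1
    have hmemR : ∀ e, e ∈ R ↔ e ∈ S ∨ e ∈ D ∨ e ∈ dropSmall x hv := by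
      intro e
      have h1 : e ∈ R ↔ e ∈ S ++ (D ++ dropSmall x hv) := by
        rw [← hsplit]; exact hperm.mem_iff
      simpa [List.mem_append] using h1
    have hSx : ∀ s ∈ S, s < x - 1 := fun s hs => hS s hs x (List.mem_cons_self)
    have hdropmem : ∀ e ∈ dropSmall x hv, e ∈ hv := by
      intro e he; rw [hsplit]; exact List.mem_append_right _ he
    rcases hdd : dropSmall x hv with _ | ⟨h, t⟩
    · -- B finds nothing usable: both decrement n
      have hc1 : PySem.Set.contains R (x - 1) = false := by
        rw [Bool.eq_false_iff]
        intro hc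
        have hmem := (PySem.Set.contains_iff R (x - 1)).1 hc
        rcases (hmemR _).1 hmem with h1 | h2 | h3
        · have := hSx _ h1; omega
        · have := hDlt _ h2; omega
        · rw [hdd] at h3; simp at h3
      have hc2 : PySem.Set.contains R (x + 1) = false := by
        rw [Bool.eq_false_iff]
        intro hc
        have hmem := (PySem.Set.contains_iff R (x + 1)).1 hc
        rcases (hmemR _).1 hmem with h1 | h2 | h3
        · have := hSx _ h1; omega
        · have := hDlt _ h2; omega
        · rw [hdd] at h3; simp at h3
      simp only [solLoopA, bConsume, hdd, hc1, hc2, Bool.false_eq_true, if_false]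
      apply ih (n - 1) (S ++ D) [] R (List.pairwise_cons.1 hneed).2 List.Pairwise.nil hS'
        (by intro h' hh'; simp at hh')
      have heq : S ++ hv = (S ++ D) ++ [] := by
        conv_lhs => rw [hsplit, hdd]
        simp
      rw [← heq]; exact hperm
    · -- B has a front candidate h with x - 1 ≤ h
      have hhge : ¬ h < x - 1 := dropSmall_head x hv h t hdd
      have hhmem : h ∈ hv := hdropmem h (by rw [hdd]; exact List.mem_cons_self)
      have hhx : h ≠ x := fun he => hdisj h hhmem (he ▸ List.mem_cons_self)
      have hpwT : (h :: t).Pairwise (· < ·) := hdd ▸ hpwDrop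
      have htgt : ∀ e ∈ t, h < e := (List.pairwise_cons.1 hpwT).1
      have hdisjT : ∀ e ∈ t, e ∉ xs := by
        intro e he hx'
        exact hdisj e (hdropmem e (by rw [hdd]; exact List.mem_cons_of_mem _ he))
          (List.mem_cons_of_mem _ hx')
      have hdisjHT : ∀ e ∈ h :: t, e ∉ xs := by
        intro e he hx'
        exact hdisj e (hdropmem e (hdd ▸ he)) (List.mem_cons_of_mem _ hx')
      by_cases hle : h ≤ x + 1
      · -- h = x-1 or x+1; consumed on both sides
        have hpermR' : (PySem.Set.discard R h).Perm ((S ++ D) ++ t) := by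
          show (R.filter (fun y => !y == h)).Perm _
          have h1 : (R.filter (fun y => !y == h)).Perm
              ((S ++ (D ++ (h :: t))).filter (fun y => !y == h)) := by
            apply List.Perm.filter
            rw [← hdd, ← hsplit]
            exact hperm
          have hfS : S.filter (fun y => !y == h) = S :=
            List.filter_eq_self.mpr (fun a ha => by
              have := hSx a ha
              simp only [Bool.not_eq_eq_eq_not, Bool.not_true, beq_eq_false_iff_ne]
              omega)
          have hfD : D.filter (fun y => !y == h) = D :=
            List.filter_eq_self.mpr (fun a ha => by
              have := hDlt a ha
              simp only [Bool.not_eq_eq_eq_not, Bool.not_true, beq_eq_false_iff_ne]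
              omega)
          have hft : t.filter (fun y => !y == h) = t :=
            List.filter_eq_self.mpr (fun a ha => by
              have := htgt a ha
              simp only [Bool.not_eq_eq_eq_not, Bool.not_true, beq_eq_false_iff_ne]
              omega)
          have h2 : (S ++ (D ++ (h :: t))).filter (fun y => !y == h) = (S ++ D) ++ t := by
            simp [List.filter_append, hfS, hfD, hft]
          rw [h2] at h1
          exact h1
        have hihT := ih n (S ++ D) t (PySem.Set.discard R h) (List.pairwise_cons.1 hneed).2
          (List.pairwise_cons.1 hpwT).2 hS' hdisjT hpermR'
        rcases (by omega : h = x - 1 ∨ h = x + 1) with hcase | hcase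
        · have c1 : PySem.Set.contains R (x - 1) = true := by
            apply (PySem.Set.contains_iff _ _).2
            apply (hmemR _).2
            right; right
            rw [hdd]
            exact hcase ▸ List.mem_cons_self
          simp only [solLoopA, bConsume, hdd, c1, if_true, if_pos hle]
          rw [← hcase]
          exact hihT
        · have c1 : PySem.Set.contains R (x - 1) = false := by
            rw [Bool.eq_false_iff]
            intro hc
            have hmem := (PySem.Set.contains_iff R (x - 1)).1 hc
            rcases (hmemR _).1 hmem with h1 | h2 | h3
            · have := hSx _ h1; omega
            · have := hDlt _ h2; omega
            · rw [hdd] at h3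
              rcases List.mem_cons.1 h3 with h4 | h4
              · omega
              · have := htgt _ h4; omega
          have c2 : PySem.Set.contains R (x + 1) = true := by
            apply (PySem.Set.contains_iff _ _).2
            apply (hmemR _).2
            right; right
            rw [hdd]
            exact hcase ▸ List.mem_cons_self
          simp only [solLoopA, bConsume, hdd, c1, c2, Bool.false_eq_true, if_false,
            if_true, if_pos hle]
          rw [← hcase]
          exact hihT
      · -- h > x + 1: nothing matches, both decrement n and keep everything
        have c1 : PySem.Set.contains R (x - 1) = false := by
          rw [Bool.eq_false_iff]
          intro hc
          have hmem := (PySem.Set.contains_iff R (x - 1)).1 hc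
          rcases (hmemR _).1 hmem with h1 | h2 | h3
          · have := hSx _ h1; omega
          · have := hDlt _ h2; omega
          · rw [hdd] at h3
            rcases List.mem_cons.1 h3 with h4 | h4
            · omega
            · have := htgt _ h4; omega
        have c2 : PySem.Set.contains R (x + 1) = false := by
          rw [Bool.eq_false_iff]
          intro hc
          have hmem := (PySem.Set.contains_iff R (x + 1)).1 hc
          rcases (hmemR _).1 hmem with h1 | h2 | h3
          · have := hSx _ h1; omega
          · have := hDlt _ h2; omega
          · rw [hdd] at h3
            rcases List.mem_cons.1 h3 with h4 | h4
            · omega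
            · have := htgt _ h4; omega
        simp only [solLoopA, bConsume, hdd, c1, c2, Bool.false_eq_true, if_false,
          if_neg hle]
        apply ih (n - 1) (S ++ D) (h :: t) R (List.pairwise_cons.1 hneed).2 hpwT hS' hdisjHT
        have heq : S ++ hv = (S ++ D) ++ (h :: t) := by
          conv_lhs => rw [hsplit, hdd]
          rw [List.append_assoc]
        rw [← heq]; exact hperm

-- the two diff computations agree: ls - (ls & rs) = ls - rs as lists
lemma diff_inter_right (ls rs : PySem.Set Int) :
    PySem.Set.diff ls (PySem.Set.inter ls rs) = PySem.Set.diff ls rs := by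
  show ls.filter _ = ls.filter _
  apply List.filter_congr
  intro e he
  by_cases h : e ∈ rs <;> simp [PySem.Set.inter, h, he]

lemma diff_inter_left (ls rs : PySem.Set Int) :
    PySem.Set.diff rs (PySem.Set.inter ls rs) = PySem.Set.diff rs ls := by
  show rs.filter _ = rs.filter _
  apply List.filter_congr
  intro e he
  by_cases h : e ∈ ls <;> simp [PySem.Set.inter, h, he]

-- ===== VERDICT (by name: the statement is the Claim_ definition above) =====
theorem solution_spec : Claim_equal_solution := by
  intro n lost reserve _
  unfold Spec_solution solution solution_alt
  simp only [diff_inter_right, diff_inter_left]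
  set ls := PySem.Set.ofList lost with hls
  set rs := PySem.Set.ofList reserve with hrs
  set dlr := PySem.Set.diff ls rs with hdlr
  set drl := PySem.Set.diff rs ls with hdrl
  have hnl : dlr.Nodup := PySem.Set.nodup_diff _ _ (PySem.Set.nodup_ofList _)
  have hnr : drl.Nodup := PySem.Set.nodup_diff _ _ (PySem.Set.nodup_ofList _)
  rw [loopB_eq_consume, List.drop_zero]
  apply loop_eq _ n [] _ _
  · exact pairwise_lt_of_le_nodup _
      (PySem.List.sorted_pairwise _ _)
      (((PySem.List.sorted_perm dlr (fun x => x) false).nodup_iff).2 hnl)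
  · exact pairwise_lt_of_le_nodup _
      (PySem.List.sorted_pairwise _ _)
      (((PySem.List.sorted_perm drl (fun x => x) false).nodup_iff).2 hnr)
  · intro s hs; simp at hs
  · intro h hh hx
    have hh' : h ∈ drl := (PySem.List.mem_sorted _ _ _ _).1 hh
    have hx' : h ∈ dlr := (PySem.List.mem_sorted _ _ _ _).1 hx
    rw [hdrl] at hh'
    rw [hdlr] at hx'
    have h1 := (PySem.Set.mem_diff _ _ _).1 hh'
    have h2 := (PySem.Set.mem_diff _ _ _).1 hx'
    exact h1.2 h2.1
  · simpa using (PySem.List.sorted_perm drl (fun x => x) false).symm
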